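-- pv_equiv track=rewrite | github.com/AlecVOV/AIO2024-100-Days-with-Python | Day 7/Max_Pooling_and_Average_Pooling.py | max_pooling
-- ===== SOURCE A (Python) =====
-- def max_pooling(mat_a, pool_size, stride):
--     # Resultant matrix after max pooling
--     pooled_matrix = []
--
--     # Iterate through the matrix with the given stride
--     for i in range(0, len(mat_a) - pool_size + 1, stride):
--         row = []
--         for j in range(0, len(mat_a[0]) - pool_size + 1, stride):
--             # Extract the pooling window
--             pooling_window = [mat_a[x][y] for x in range(i, i + pool_size) for y in range(j, j + pool_size)]
--             # Find the maximum value in the pooling window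
--             max_value = max(pooling_window)
--             row.append(max_value)
--         pooled_matrix.append(row)
--
--     return pooled_matrix
-- ===== SOURCE B (Python) =====
-- def max_pooling(mat_a, pool_size, stride):
--     # Separable max pooling: per-row window maxima first, then a column pass
--     # over the block of pooled rows (zip transposes the block).
--     width = len(mat_a[0]) if mat_a else 0
--     row_max = [[max(r[j:j + pool_size]) for j in range(0, width - pool_size + 1, stride)]
--                for r in mat_a]
--     return [[max(col) for col in zip(*row_max[i:i + pool_size])]
--             for i in range(0, len(mat_a) - pool_size + 1, stride)]
-- ===== Notes on version B (the rewrite author's own statement) =====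
-- stated objective: alternative
-- what changed: A scans all pool_size^2 cells of every window; B is a separable two-pass pooling: one pass of per-row sliding-window maxima, then a column pass that takes maxima over the transposed block of pooled rows, so each output cell reads 2*pool_size values instead of pool_size^2 (same measured speed at the generated window sizes).
-- outside the precondition, e.g. on max_pooling([[1, 2], [], [3, 4]], 1, 2): A returns [[1], [3]], B raises ValueError; on max_pooling([[1, -4, 2, -4], [2, -1]], 1, 3): A returns [[1, -4]], B raises ValueError
import Mathlib
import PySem

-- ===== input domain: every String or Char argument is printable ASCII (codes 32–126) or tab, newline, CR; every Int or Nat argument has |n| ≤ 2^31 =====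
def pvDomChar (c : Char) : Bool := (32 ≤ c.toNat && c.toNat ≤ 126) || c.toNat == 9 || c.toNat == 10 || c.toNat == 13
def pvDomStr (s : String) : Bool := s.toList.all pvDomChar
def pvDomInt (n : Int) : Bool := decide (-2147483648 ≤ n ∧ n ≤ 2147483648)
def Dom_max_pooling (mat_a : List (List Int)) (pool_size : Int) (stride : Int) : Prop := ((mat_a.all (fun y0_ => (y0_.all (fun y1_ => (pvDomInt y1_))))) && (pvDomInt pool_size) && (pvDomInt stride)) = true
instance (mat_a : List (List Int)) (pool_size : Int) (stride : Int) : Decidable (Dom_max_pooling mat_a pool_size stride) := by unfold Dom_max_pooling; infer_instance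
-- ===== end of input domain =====

-- B replaces A's per-window k*k scans by a separable two-pass pooling (row-wise window maxima,
-- then a column pass over the transposed block); objective: alternative algorithm of similar cost.


-- ===== PORT A =====
-- literal port of A; the `.getD`/`pyGetD` defaults stand exactly where Python would raise
-- (IndexError / max of an empty window) — unreachable under Pre_.
def max_pooling (mat_a : List (List Int)) (pool_size : Int) (stride : Int) : List (List Int) :=
  (PySem.List.pyRange 0 ((mat_a.length : Int) - pool_size + 1) stride).foldl
    (fun pooled_matrix i =>
      pooled_matrix ++
        [(PySem.List.pyRange 0 ((((PySem.List.pyGet? mat_a 0).getD []).length : Int) - pool_size + 1) stride).foldl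
          (fun row j =>
            row ++
              [(PySem.List.max?
                  ((PySem.List.pyRange i (i + pool_size) 1).flatMap (fun x =>
                    (PySem.List.pyRange j (j + pool_size) 1).map (fun y =>
                      PySem.List.pyGetD (PySem.List.pyGetD mat_a x []) y 0)))
                  (fun v => v)).getD 0])
          []])
    []

-- ===== PORT B =====
-- hand port of Python's zip(*rows) on a list of integer rows (exact: columns up to the
-- shortest row; the first row's length bounds the recursion, and zip of no rows is []).
def pvZipCols : Nat → List (List Int) → List (List Int)
  | 0, _ => []
  | n + 1, rows =>
      if rows.any (fun r => r.isEmpty) then []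
      else rows.map (fun r => r.headD 0) :: pvZipCols n (rows.map (fun r => r.tail))

def pvZipStar (rows : List (List Int)) : List (List Int) :=
  match rows with
  | [] => []
  | r :: _ => pvZipCols r.length rows

-- literal port of B (Source B); `.getD 0` stands where Python's max would raise on an empty window.
def max_pooling_alt (mat_a : List (List Int)) (pool_size : Int) (stride : Int) : List (List Int) :=
  let width : Int := if mat_a.isEmpty then 0 else ((mat_a.headD []).length : Int)
  let row_max := mat_a.map (fun r =>
    (PySem.List.pyRange 0 (width - pool_size + 1) stride).map (fun j =>
      (PySem.List.max? (PySem.List.slice r (some j) (some (j + pool_size))) (fun v => v)).getD 0))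
  (PySem.List.pyRange 0 ((mat_a.length : Int) - pool_size + 1) stride).map (fun i =>
    (pvZipStar (PySem.List.slice row_max (some i) (some (i + pool_size)))).map (fun col =>
      (PySem.List.max? col (fun v => v)).getD 0))

-- ===== PRECONDITION & SPEC =====
-- Pre_ excludes stride 0 and nonpositive pool_size with positive stride (A raises ValueError),
-- ragged matrices a window actually reaches beyond a short row (A raises IndexError), and ragged
-- matrices whose short rows A's stride merely skips — there A's value is accidental and B raises;
-- all rectangular inputs and all trivially-empty poolings (including negative strides) are kept.
def Pre_max_pooling (mat_a : List (List Int)) (pool_size : Int) (stride : Int) : Prop :=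
  (1 ≤ stride ∧ 1 ≤ pool_size ∧
      (((mat_a.headD []).length : Int) < pool_size ∨
        ∀ r ∈ mat_a, (mat_a.headD []).length ≤ r.length))
  ∨ (stride ≤ -1 ∧ pool_size ≤ ((mat_a.headD []).length : Int) + 1)
instance (mat_a : List (List Int)) (pool_size : Int) (stride : Int) : Decidable (Pre_max_pooling mat_a pool_size stride) := by unfold Pre_max_pooling; infer_instance

def pvWitness_max_pooling : List (List Int) × Int × Int := ([[1, 2], [3, 4]], 2, 1)

def Spec_max_pooling (mat_a : List (List Int)) (pool_size : Int) (stride : Int) (out : List (List Int)) : Prop := out = max_pooling_alt mat_a pool_size stride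
instance (mat_a : List (List Int)) (pool_size : Int) (stride : Int) (out : List (List Int)) : Decidable (Spec_max_pooling mat_a pool_size stride out) := by unfold Spec_max_pooling; infer_instance

-- ===== CLAIM (what is proved, stated in full; the proofs are below) =====
def Claim_equal_max_pooling : Prop := ∀ (mat_a : List (List Int)) (pool_size : Int) (stride : Int), Dom_max_pooling mat_a pool_size stride → Pre_max_pooling mat_a pool_size stride → Spec_max_pooling mat_a pool_size stride (max_pooling mat_a pool_size stride)

-- ===== LEMMAS AND PROOFS =====

-- max(xs) with no key, as a total function (only ever applied to nonempty lists)
def pvMaxD (l : List Int) : Int := (PySem.List.max? l (fun v => v)).getD 0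

theorem pvMaxD_cons (x : Int) (t : List Int) : pvMaxD (x :: t) = t.foldl max x := by
  simp [pvMaxD, PySem.List.max?_id_cons]

theorem pv_foldl_max_shift (u : List Int) (a b : Int) :
    u.foldl max (max a b) = max a (u.foldl max b) := by
  induction u generalizing b with
  | nil => simp
  | cons y u ih => simpa [max_assoc] using ih (max b y)

theorem pv_foldl_max_nonempty (y : Int) (v : List Int) (a : Int) :
    (y :: v).foldl max a = max a (pvMaxD (y :: v)) := by
  simp only [List.foldl_cons, pvMaxD_cons]
  exact pv_foldl_max_shift v a y

theorem pvMaxD_append (l₁ l₂ : List Int) (h₁ : l₁ ≠ []) (h₂ : l₂ ≠ []) :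
    pvMaxD (l₁ ++ l₂) = max (pvMaxD l₁) (pvMaxD l₂) := by
  obtain ⟨x, t, rfl⟩ := List.exists_cons_of_ne_nil h₁
  obtain ⟨y, u, rfl⟩ := List.exists_cons_of_ne_nil h₂
  simp only [List.cons_append, pvMaxD_cons, List.foldl_append, List.foldl_cons]
  rw [pv_foldl_max_shift, ← pvMaxD_cons]

-- the max of a concatenation of nonempty lists is the max of their maxima
theorem pvMaxD_flat (L : List (List Int)) (hL : L ≠ []) (h : ∀ l ∈ L, l ≠ []) :
    pvMaxD (L.flatMap id) = pvMaxD (L.map pvMaxD) := by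
  induction L with
  | nil => cases hL rfl
  | cons l L ih =>
    cases L with
    | nil => simp [pvMaxD_cons]
    | cons l' L' =>
      have hne : (l' :: L').flatMap id ≠ [] := by
        simp only [List.flatMap_cons]
        have : l' ≠ [] := h l' (by simp)
        intro hc
        exact this (List.append_eq_nil_iff.mp hc).1
      rw [List.flatMap_cons, id_eq, pvMaxD_append l _ (h l (by simp)) hne,
        ih (by simp) (fun x hx => h x (by simp [hx])), List.map_cons, List.map_cons,
        pvMaxD_cons (pvMaxD l), List.map_cons, pv_foldl_max_nonempty]

-- the index comprehension [xs[x] for x in range(i, i+k)] is the slice xs[i:i+k]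
theorem pv_mapGetD {γ : Type} (xs : List γ) (d : γ) (i k : Int) (h0 : 0 ≤ i) (hk : 0 ≤ k)
    (h : i + k ≤ (xs.length : Int)) :
    (PySem.List.pyRange i (i + k) 1).map (fun x => PySem.List.pyGetD xs x d) =
      (xs.drop i.toNat).take k.toNat := by
  rw [PySem.List.pyRange_one]
  have hik : (i + k - i).toNat = k.toNat := by omega
  rw [hik, List.map_map]
  apply List.ext_getElem
  · simp; omega
  · intro n h1 h2
    simp only [List.getElem_map, List.getElem_range, Function.comp_apply]
    have hn : n < k.toNat := by simpa using h1
    rw [PySem.List.pyGetD_eq_getElem xs d (by omega) (by omega)]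
    rw [List.getElem_take, List.getElem_drop]
    congr 1
    omega

theorem pv_slice_map {α β : Type} (l : List α) (f : α → β) (a b : Int) :
    PySem.List.slice (l.map f) (some a) (some b) = (PySem.List.slice l (some a) (some b)).map f := by
  simp [PySem.List.slice, List.map_drop, List.map_take]

-- zip(*rows) of per-element maps over the same column list is the transposed table
theorem pv_zipCols_map {α β : Type} (cols : List β) (ls : List α) (f : α → β → Int) :
    pvZipCols cols.length (ls.map fun r => cols.map (f r)) =
      cols.map fun c => ls.map fun r => f r c := by
  induction cols generalizing f with
  | nil => simp [pvZipCols]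
  | cons c cs ih =>
    rw [List.length_cons, pvZipCols]
    rw [if_neg (by simp)]
    rw [List.map_map, List.map_map]
    simp only [Function.comp_def]
    have h1 : (ls.map fun r => ((c :: cs).map (f r)).headD 0) = ls.map fun r => f r c := by
      simp
    have h2 : (ls.map fun r => ((c :: cs).map (f r)).tail) = ls.map fun r => cs.map (f r) := by
      simp
    rw [h1, h2, ih]
    simp

theorem pv_zipStar_map {α β : Type} (cols : List β) (ls : List α) (f : α → β → Int)
    (h : ls ≠ []) :
    pvZipStar (ls.map fun r => cols.map (f r)) = cols.map fun c => ls.map fun r => f r c := by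
  obtain ⟨r0, ls', rfl⟩ := List.exists_cons_of_ne_nil h
  show pvZipCols ((cols.map (f r0)).length) _ = _
  rw [List.length_map]
  exact pv_zipCols_map cols (r0 :: ls') f

theorem pv_pyRange_neg_empty (a b s : Int) (hs : s < 0) (hab : a ≤ b) :
    PySem.List.pyRange a b s = [] := by
  simp [PySem.List.pyRange, hs.ne, if_neg (by omega : ¬ b < a), if_neg (not_lt.mpr hs.le)]

theorem pv_pyRange_pos_empty (a b s : Int) (hs : 0 < s) (hab : b ≤ a) :
    PySem.List.pyRange a b s = [] := by
  simp [PySem.List.pyRange_of_pos a b hs, if_neg (not_lt.mpr hab)]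

-- A's flat k×k window maximum equals the maximum of the per-row window maxima over the row block
theorem pv_cell (mat : List (List Int)) (k i j : Int) (hk : 1 ≤ k) (hi0 : 0 ≤ i)
    (hik : i + k ≤ (mat.length : Int)) (hj0 : 0 ≤ j)
    (hrect : ∀ r ∈ mat, j + k ≤ (r.length : Int)) :
    pvMaxD ((PySem.List.pyRange i (i + k) 1).flatMap (fun x =>
        (PySem.List.pyRange j (j + k) 1).map (fun y =>
          PySem.List.pyGetD (PySem.List.pyGetD mat x []) y 0))) =
      pvMaxD (((mat.drop i.toNat).take k.toNat).map (fun r =>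
        pvMaxD (PySem.List.slice r (some j) (some (j + k))))) := by
  have hmap : (PySem.List.pyRange i (i + k) 1).map (fun x => PySem.List.pyGetD mat x []) =
      (mat.drop i.toNat).take k.toNat := pv_mapGetD mat [] i k hi0 (by omega) hik
  have hflat : (PySem.List.pyRange i (i + k) 1).flatMap (fun x =>
      (PySem.List.pyRange j (j + k) 1).map (fun y =>
        PySem.List.pyGetD (PySem.List.pyGetD mat x []) y 0)) =
      (((mat.drop i.toNat).take k.toNat).map (fun r =>
        (PySem.List.pyRange j (j + k) 1).map (fun y => PySem.List.pyGetD r y 0))).flatMap id := by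
    rw [← hmap, List.flatMap_map, List.flatMap_map]
    rfl
  set ls := (mat.drop i.toNat).take k.toNat with hls
  have hlslen : ls.length = k.toNat := by
    simp only [hls, List.length_take, List.length_drop]
    omega
  have hlsne : ls ≠ [] := by
    intro hc
    rw [hc] at hlslen
    simp at hlslen
    omega
  have hmem : ∀ r ∈ ls, r ∈ mat := fun r hr =>
    List.mem_of_mem_drop (List.mem_of_mem_take hr)
  have hG : ∀ r ∈ ls,
      (PySem.List.pyRange j (j + k) 1).map (fun y => PySem.List.pyGetD r y 0) =
        PySem.List.slice r (some j) (some (j + k)) := by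
    intro r hr
    have hlen := hrect r (hmem r hr)
    rw [pv_mapGetD r 0 j k hj0 (by omega) hlen,
      PySem.List.slice_of_nonneg r hj0 (by omega) (by omega) (by omega)]
    congr 1
    omega
  rw [hflat, pvMaxD_flat _ (by simp [hlsne]) ?_, List.map_map]
  · apply congrArg
    apply List.map_congr_left
    intro r hr
    simp only [Function.comp_apply]
    rw [hG r hr]
  · intro l hl
    obtain ⟨r, hr, rfl⟩ := List.mem_map.mp hl
    have hlen := hrect r (hmem r hr)
    rw [hG r hr, PySem.List.slice_of_nonneg r hj0 (by omega) (by omega) (by omega)]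
    intro hc
    have := congrArg List.length hc
    simp only [List.length_take, List.length_drop, List.length_nil] at this
    omega

-- ===== VERDICT (by name: the statement is the Claim_ definition above) =====
theorem max_pooling_spec : Claim_equal_max_pooling := by
  intro mat k s _ hpre
  unfold Spec_max_pooling
  have hhead : (PySem.List.pyGet? mat 0).getD [] = mat.headD [] := by
    cases mat with
    | nil => rfl
    | cons a t => simp
  have hwidth : (if mat.isEmpty then (0 : Int) else ((mat.headD []).length : Int)) =
      ((mat.headD []).length : Int) := by
    cases mat <;> simp
  simp only [max_pooling, max_pooling_alt, hhead, hwidth,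
    PySem.List.foldl_append_singleton_eq_map, List.nil_append]
  by_cases hRj : PySem.List.pyRange 0 (((mat.headD []).length : Int) - k + 1) s = []
  · -- no column windows: every produced row is empty on both sides
    rw [hRj]
    simp only [List.map_nil]
    apply List.map_congr_left
    intro i _
    cases hsl : PySem.List.slice (mat.map fun _ => ([] : List Int)) (some i) (some (i + k)) with
    | nil => simp [pvZipStar]
    | cons r rest =>
      have hr : r = [] := by
        have hrm : r ∈ mat.map fun _ => ([] : List Int) :=
          PySem.List.mem_of_mem_slice _ (some i) (some (i + k))
            (by rw [hsl]; exact List.mem_cons_self)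
        obtain ⟨_, _, h⟩ := List.mem_map.mp hrm
        exact h.symm
      rw [hr]
      simp [pvZipStar, pvZipCols]
  · -- main case: positive stride and pool size, rectangular-enough matrix
    have hmain : 1 ≤ s ∧ 1 ≤ k ∧ ∀ r ∈ mat, (mat.headD []).length ≤ r.length := by
      rcases hpre with ⟨hs1, hk1, hwk | hrect⟩ | ⟨hs1, hk1⟩
      · exact absurd (pv_pyRange_pos_empty _ _ _ (by omega) (by omega)) hRj
      · exact ⟨hs1, hk1, hrect⟩
      · exact absurd (pv_pyRange_neg_empty _ _ _ (by omega) (by omega)) hRj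
    obtain ⟨hs1, hk1, hrect⟩ := hmain
    apply List.map_congr_left
    intro i hi
    obtain ⟨hi0, hiub, -⟩ := (PySem.List.mem_pyRange_iff_of_pos (by omega) i).mp hi
    have hsl : PySem.List.slice mat (some i) (some (i + k)) = (mat.drop i.toNat).take k.toNat := by
      rw [PySem.List.slice_of_nonneg mat hi0 (by omega) (by omega) (by omega)]
      congr 1
      omega
    have hlslen : ((mat.drop i.toNat).take k.toNat).length = k.toNat := by
      simp only [List.length_take, List.length_drop]
      omega
    have hlsne : (mat.drop i.toNat).take k.toNat ≠ [] := by
      intro hc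
      rw [hc] at hlslen
      simp at hlslen
      omega
    rw [pv_slice_map, hsl, pv_zipStar_map _ _ _ hlsne, List.map_map]
    apply List.map_congr_left
    intro j hj
    obtain ⟨hj0, hjub, -⟩ := (PySem.List.mem_pyRange_iff_of_pos (by omega) j).mp hj
    have := pv_cell mat k i j hk1 hi0 (by omega) hj0
      (fun r hr => by have := hrect r hr; omega)
    simpa [pvMaxD] using this
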